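-- pv_equiv track=rewrite | github.com/bmarchand/rna_barrier_bisr | rna_barrier_bisr/utilities.py | filter_common_bps
-- ===== SOURCE A (Python) =====
-- def list_bps(s):
--     stack = []
--     bps = []
--     for k, c in enumerate(s):
--         if c=='(':
--             stack.append(k)
--         if c==')':
--             bps.append((stack.pop(), k))
--     return bps
--
-- def filter_common_bps(s1, s2):
--     bps1 = list_bps(s1)
--     bps2 = list_bps(s2)
--
--     s1 = list(s1)
--     s2 = list(s2)
--
--     for bp in bps1:
--         if bp in bps2:
--             i,j = bp
--             s1[i] = '.'
--             s1[j] = '.'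
--             s2[i] = '.'
--             s2[j] = '.'
--
--     return "".join(s1), "".join(s2)
-- ===== SOURCE B (Python) =====
-- def list_bps(s):
--     stack = []
--     bps = []
--     for k, c in enumerate(s):
--         if c=='(':
--             stack.append(k)
--         if c==')':
--             bps.append((stack.pop(), k))
--     return bps
--
-- def filter_common_bps(s1, s2):
--     common = set(list_bps(s1)) & set(list_bps(s2))
--     blank = {k for bp in common for k in bp}
--     t1 = "".join('.' if k in blank else c for k, c in enumerate(s1))
--     t2 = "".join('.' if k in blank else c for k, c in enumerate(s2))
--     return t1, t2
-- ===== Notes on version B (the rewrite author's own statement) =====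
-- stated objective: alternative
-- what changed: Replaces A's pair-driven in-place mutation loop (for each bp in bps1, test membership in bps2 and overwrite four list positions) with a set intersection of the two base-pair lists flattened into one blank-index set, from which both output strings are rebuilt in a single character-driven pass over enumerate.
import Mathlib
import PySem

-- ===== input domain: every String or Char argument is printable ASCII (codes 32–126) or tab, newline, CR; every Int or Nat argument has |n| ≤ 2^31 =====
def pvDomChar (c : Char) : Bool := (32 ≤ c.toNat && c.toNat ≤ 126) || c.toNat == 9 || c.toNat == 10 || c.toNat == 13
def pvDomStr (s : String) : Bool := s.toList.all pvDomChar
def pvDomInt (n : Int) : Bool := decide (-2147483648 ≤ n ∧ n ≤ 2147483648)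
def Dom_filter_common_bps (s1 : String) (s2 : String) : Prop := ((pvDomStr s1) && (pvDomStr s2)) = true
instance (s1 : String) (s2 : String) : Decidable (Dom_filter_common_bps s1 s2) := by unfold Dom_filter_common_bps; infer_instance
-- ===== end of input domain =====

-- B rebuilds both strings in one character-driven pass over a blank-index set obtained from the
-- intersection of the two base-pair sets, instead of A's pair-driven in-place mutation loop.

-- ===== PORT A =====
-- shared helper list_bps (LIFO stack ported with head-cons; on ')' with an empty stack Python
-- raises IndexError — the port leaves the state unchanged there, and Pre_ excludes those inputs)
def lbStep (st : List Int × List (Int × Int)) (kc : Int × Char) :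
    List Int × List (Int × Int) :=
  let st' := if kc.2 = '(' then (kc.1 :: st.1, st.2) else st
  if kc.2 = ')' then
    match st'.1 with
    | [] => st'                                  -- Python: IndexError (outside Pre_)
    | i :: rest => (rest, st'.2 ++ [(i, kc.1)])
  else st'

def listBps (l : List Char) : List (Int × Int) :=
  ((PySem.List.enumerate l 0).foldl lbStep ([], [])).2

-- loop body of A's mutation loop
def stepA (bps2 : List (Int × Int)) (p : List Char × List Char) (bp : Int × Int) :
    List Char × List Char :=
  if bp ∈ bps2 then
    (PySem.List.pySetD (PySem.List.pySetD p.1 bp.1 '.') bp.2 '.',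
     PySem.List.pySetD (PySem.List.pySetD p.2 bp.1 '.') bp.2 '.')
  else p

def filter_common_bps (s1 : String) (s2 : String) : String × String :=
  let bps1 := listBps s1.toList
  let bps2 := listBps s2.toList
  let p := bps1.foldl (stepA bps2) (s1.toList, s2.toList)
  (String.ofList p.1, String.ofList p.2)

-- ===== PORT B =====
def filter_common_bps_alt (s1 : String) (s2 : String) : String × String :=
  let bps1 := listBps s1.toList
  let bps2 := listBps s2.toList
  let common : PySem.Set (Int × Int) := PySem.Set.inter (PySem.Set.ofList bps1) (PySem.Set.ofList bps2)
  let blank : PySem.Set Int :=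
    common.foldl (fun acc bp => PySem.Set.add (PySem.Set.add acc bp.1) bp.2) PySem.Set.empty
  (String.ofList ((PySem.List.enumerate s1.toList 0).map (fun kc => if kc.1 ∈ blank then '.' else kc.2)),
   String.ofList ((PySem.List.enumerate s2.toList 0).map (fun kc => if kc.1 ∈ blank then '.' else kc.2)))

-- ===== PRECONDITION & SPEC =====
-- Pre_ excludes exactly the inputs on which list_bps pops an empty stack (some prefix of s1 or s2
-- contains more ')' than '('): Python A (and B alike) raise IndexError there.
def prefixBalanced (l : List Char) : Prop :=
  ∀ n ≤ l.length, (l.take n).count ')' ≤ (l.take n).count '('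

def Pre_filter_common_bps (s1 : String) (s2 : String) : Prop :=
  prefixBalanced s1.toList ∧ prefixBalanced s2.toList

instance (s1 : String) (s2 : String) : Decidable (Pre_filter_common_bps s1 s2) := by
  unfold Pre_filter_common_bps prefixBalanced; infer_instance

def pvWitness_filter_common_bps : String × String := ("((a))", "(a)()")

def Spec_filter_common_bps (s1 : String) (s2 : String) (out : String × String) : Prop := out = filter_common_bps_alt s1 s2
instance (s1 : String) (s2 : String) (out : String × String) : Decidable (Spec_filter_common_bps s1 s2 out) := by unfold Spec_filter_common_bps; infer_instance

-- ===== CLAIM (what is proved, stated in full; the proofs are below) =====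
def Claim_equal_filter_common_bps : Prop := ∀ (s1 : String) (s2 : String), Dom_filter_common_bps s1 s2 → Pre_filter_common_bps s1 s2 → Spec_filter_common_bps s1 s2 (filter_common_bps s1 s2)

-- ===== LEMMAS AND PROOFS =====

-- one step of list_bps preserves nonnegativity of the stack and of the recorded pairs
theorem lbStep_inv (stk : List Int) (bps : List (Int × Int)) (kc : Int × Char)
    (hk : 0 ≤ kc.1) (h1 : ∀ x ∈ stk, 0 ≤ x) (h2 : ∀ bp ∈ bps, 0 ≤ bp.1 ∧ 0 ≤ bp.2) :
    (∀ x ∈ (lbStep (stk, bps) kc).1, 0 ≤ x) ∧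
    (∀ bp ∈ (lbStep (stk, bps) kc).2, 0 ≤ bp.1 ∧ 0 ≤ bp.2) := by
  obtain ⟨k, c⟩ := kc
  by_cases hop : c = '('
  · subst hop
    simp only [lbStep, if_neg (by decide : ¬('(' = ')'))]
    constructor
    · intro x hx
      rcases List.mem_cons.mp hx with rfl | hx
      · exact hk
      · exact h1 x hx
    · exact h2
  · by_cases hcl : c = ')'
    · subst hcl
      simp only [lbStep, if_neg (by decide : ¬(')' = '('))]
      cases stk with
      | nil => exact ⟨h1, h2⟩
      | cons i rest =>
          refine ⟨fun x hx => h1 x (List.mem_cons_of_mem _ hx), ?_⟩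
          intro bp hbp
          rcases List.mem_append.mp hbp with hbp | hbp
          · exact h2 bp hbp
          · rcases List.mem_singleton.mp hbp with rfl
            exact ⟨h1 i List.mem_cons_self, hk⟩
    · simp only [lbStep, if_neg hop, if_neg hcl]
      exact ⟨h1, h2⟩

theorem lbFold_nonneg (l : List Char) (s : Int) (st : List Int × List (Int × Int))
    (hs : 0 ≤ s) (h1 : ∀ x ∈ st.1, 0 ≤ x) (h2 : ∀ bp ∈ st.2, 0 ≤ bp.1 ∧ 0 ≤ bp.2) :
    (∀ x ∈ ((PySem.List.enumerate l s).foldl lbStep st).1, 0 ≤ x) ∧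
    (∀ bp ∈ ((PySem.List.enumerate l s).foldl lbStep st).2, 0 ≤ bp.1 ∧ 0 ≤ bp.2) := by
  induction l generalizing s st with
  | nil =>
      simp only [PySem.List.enumerate_nil, List.foldl_nil]
      exact ⟨h1, h2⟩
  | cons c tl ih =>
      rw [PySem.List.enumerate_cons, List.foldl_cons]
      obtain ⟨stk, bps⟩ := st
      obtain ⟨g1, g2⟩ := lbStep_inv stk bps (s, c) hs h1 h2
      exact ih (s + 1) _ (by omega) g1 g2

-- every pair produced by list_bps has nonnegative components (indices come from enumerate _ 0)
theorem listBps_nonneg (l : List Char) : ∀ bp ∈ listBps l, 0 ≤ bp.1 ∧ 0 ≤ bp.2 :=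
  (lbFold_nonneg l 0 ([], []) le_rfl (by simp) (by simp)).2

-- two in-place assignments of '.', per position
theorem set2_getElem? (l : List Char) (i j : Int) (hi : 0 ≤ i) (hj : 0 ≤ j) (k : Nat) :
    (PySem.List.pySetD (PySem.List.pySetD l i '.') j '.')[k]? =
      if k < l.length ∧ (i = (k : Int) ∨ j = (k : Int)) then some '.' else l[k]? := by
  rw [PySem.List.pySetD_of_nonneg _ _ hi, PySem.List.pySetD_of_nonneg _ _ hj]
  simp only [List.getElem?_set, List.length_set]
  have hi' : i.toNat = k ↔ i = (k : Int) := by omega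
  have hj' : j.toNat = k ↔ j = (k : Int) := by omega
  by_cases hk : k < l.length <;> split_ifs with h1 h2 h3 h4 h5 <;> simp_all

theorem ite_ite_same {α : Type} (A B : Prop) [Decidable A] [Decidable B] (x y : α) :
    (if A then x else if B then x else y) = if B ∨ A then x else y := by
  by_cases hA : A <;> by_cases hB : B <;> simp [hA, hB]

-- characterisation of A's mutation loop, per position (both strings at once)
theorem foldA_getElem? (bps2 bps : List (Int × Int)) (l1 l2 : List Char) (k : Nat)
    (hnn : ∀ bp ∈ bps, 0 ≤ bp.1 ∧ 0 ≤ bp.2) :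
    (((bps.foldl (stepA bps2) (l1, l2)).1)[k]? =
      (if k < l1.length ∧ ∃ bp ∈ bps, bp ∈ bps2 ∧ (bp.1 = (k : Int) ∨ bp.2 = (k : Int))
       then some '.' else l1[k]?)) ∧
    (((bps.foldl (stepA bps2) (l1, l2)).2)[k]? =
      (if k < l2.length ∧ ∃ bp ∈ bps, bp ∈ bps2 ∧ (bp.1 = (k : Int) ∨ bp.2 = (k : Int))
       then some '.' else l2[k]?)) := by
  induction bps generalizing l1 l2 with
  | nil => simp
  | cons bp rest ih =>
      have hbp := hnn bp (by simp)
      have hrest : ∀ q ∈ rest, 0 ≤ q.1 ∧ 0 ≤ q.2 := fun q hq => hnn q (by simp [hq])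
      have hcond : ∀ L : Nat,
          (k < L ∧ ∃ q ∈ bp :: rest, q ∈ bps2 ∧ (q.1 = (k:Int) ∨ q.2 = (k:Int))) ↔
          ((k < L ∧ (bp ∈ bps2 ∧ (bp.1 = (k:Int) ∨ bp.2 = (k:Int)))) ∨
           (k < L ∧ ∃ q ∈ rest, q ∈ bps2 ∧ (q.1 = (k:Int) ∨ q.2 = (k:Int)))) := by
        intro L
        constructor
        · rintro ⟨hL, q, hq, h⟩
          rcases List.mem_cons.mp hq with rfl | hq
          · exact Or.inl ⟨hL, h⟩
          · exact Or.inr ⟨hL, q, hq, h⟩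
        · rintro (⟨hL, h⟩ | ⟨hL, q, hq, h⟩)
          · exact ⟨hL, bp, List.mem_cons_self, h⟩
          · exact ⟨hL, q, List.mem_cons_of_mem _ hq, h⟩
      simp only [List.foldl_cons, stepA]
      by_cases hmem : bp ∈ bps2
      · simp only [if_pos hmem]
        obtain ⟨h1, h2⟩ := ih (PySem.List.pySetD (PySem.List.pySetD l1 bp.1 '.') bp.2 '.')
          (PySem.List.pySetD (PySem.List.pySetD l2 bp.1 '.') bp.2 '.') hrest
        have len1 : (PySem.List.pySetD (PySem.List.pySetD l1 bp.1 '.') bp.2 '.').length = l1.length := by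
          rw [PySem.List.pySetD_of_nonneg _ _ hbp.1, PySem.List.pySetD_of_nonneg _ _ hbp.2]; simp
        have len2 : (PySem.List.pySetD (PySem.List.pySetD l2 bp.1 '.') bp.2 '.').length = l2.length := by
          rw [PySem.List.pySetD_of_nonneg _ _ hbp.1, PySem.List.pySetD_of_nonneg _ _ hbp.2]; simp
        rw [h1, h2, len1, len2, set2_getElem? _ _ _ hbp.1 hbp.2, set2_getElem? _ _ _ hbp.1 hbp.2,
            ite_ite_same, ite_ite_same]
        have hiff : ∀ L : Nat,
            (k < L ∧ ∃ q ∈ bp :: rest, q ∈ bps2 ∧ (q.1 = (k:Int) ∨ q.2 = (k:Int))) ↔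
            ((k < L ∧ (bp.1 = (k:Int) ∨ bp.2 = (k:Int))) ∨
             (k < L ∧ ∃ q ∈ rest, q ∈ bps2 ∧ (q.1 = (k:Int) ∨ q.2 = (k:Int)))) := by
          intro L
          rw [hcond L]
          constructor
          · rintro (⟨hL, _, h⟩ | h)
            · exact Or.inl ⟨hL, h⟩
            · exact Or.inr h
          · rintro (⟨hL, h⟩ | h)
            · exact Or.inl ⟨hL, hmem, h⟩
            · exact Or.inr h
        constructor
        · simp only [hiff l1.length]
        · simp only [hiff l2.length]
      · simp only [if_neg hmem]
        obtain ⟨h1, h2⟩ := ih l1 l2 hrest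
        rw [h1, h2]
        have hdrop : ∀ L : Nat,
            (k < L ∧ ∃ q ∈ rest, q ∈ bps2 ∧ (q.1 = (k:Int) ∨ q.2 = (k:Int))) ↔
            (k < L ∧ ∃ q ∈ bp :: rest, q ∈ bps2 ∧ (q.1 = (k:Int) ∨ q.2 = (k:Int))) := by
          intro L
          rw [hcond L]
          constructor
          · exact Or.inr
          · rintro (⟨_, h, _⟩ | h)
            · exact absurd h hmem
            · exact h
        constructor
        · simp only [hdrop l1.length]
        · simp only [hdrop l2.length]

-- membership in B's blank-index set
theorem mem_blank (bps : List (Int × Int)) (acc : PySem.Set Int) (x : Int) :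
    x ∈ bps.foldl (fun acc bp => PySem.Set.add (PySem.Set.add acc bp.1) bp.2) acc ↔
      x ∈ acc ∨ ∃ bp ∈ bps, bp.1 = x ∨ bp.2 = x := by
  induction bps generalizing acc with
  | nil => simp
  | cons bp rest ih =>
      simp only [List.foldl_cons, ih, PySem.Set.mem_add, List.mem_cons]
      constructor
      · rintro (((h|h)|h) | ⟨q, hq, h⟩)
        · exact Or.inl h
        · exact Or.inr ⟨bp, Or.inl rfl, Or.inl h.symm⟩
        · exact Or.inr ⟨bp, Or.inl rfl, Or.inr h.symm⟩
        · exact Or.inr ⟨q, Or.inr hq, h⟩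
      · rintro (h | ⟨q, (rfl|hq), h⟩)
        · exact Or.inl (Or.inl (Or.inl h))
        · rcases h with h|h
          · exact Or.inl (Or.inl (Or.inr h.symm))
          · exact Or.inl (Or.inr h.symm)
        · exact Or.inr ⟨q, hq, h⟩

-- B's rebuilt character at an in-range position, re-expressed through the common-pair condition
theorem blankChar (bps1 bps2 : List (Int × Int)) (l : List Char) (k : Nat) (hk : k < l.length) :
    (if ((k : Int) ∈ (PySem.Set.inter (PySem.Set.ofList bps1) (PySem.Set.ofList bps2)).foldl
          (fun acc bp => PySem.Set.add (PySem.Set.add acc bp.1) bp.2) PySem.Set.empty)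
     then '.' else l[k]) =
    (if (k < l.length ∧ ∃ bp ∈ bps1, bp ∈ bps2 ∧ (bp.1 = (k : Int) ∨ bp.2 = (k : Int)))
     then '.' else l[k]) := by
  congr 1
  rw [eq_iff_iff, mem_blank]
  simp only [PySem.Set.empty, List.not_mem_nil, false_or, PySem.Set.mem_inter,
    PySem.Set.mem_ofList]
  constructor
  · rintro ⟨bp, ⟨hb1, hb2⟩, h⟩
    exact ⟨hk, bp, hb1, hb2, by tauto⟩
  · rintro ⟨_, bp, hb1, hb2, h⟩
    exact ⟨bp, ⟨hb1, hb2⟩, by tauto⟩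

theorem ports_agree (s1 s2 : String) : filter_common_bps s1 s2 = filter_common_bps_alt s1 s2 := by
  simp only [filter_common_bps, filter_common_bps_alt]
  have key : ∀ (l : List Char) (res : List Char),
      (∀ k : Nat, res[k]? =
        if (k < l.length ∧ ∃ bp ∈ listBps s1.toList, bp ∈ listBps s2.toList ∧
             (bp.1 = (k : Int) ∨ bp.2 = (k : Int)))
        then some '.' else l[k]?) →
      res = (PySem.List.enumerate l 0).map
        (fun kc => if kc.1 ∈ ((PySem.Set.inter (PySem.Set.ofList (listBps s1.toList))
            (PySem.Set.ofList (listBps s2.toList))).foldl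
            (fun acc bp => PySem.Set.add (PySem.Set.add acc bp.1) bp.2) PySem.Set.empty)
          then '.' else kc.2) := by
    intro l res hres
    apply List.ext_getElem?
    intro k
    rw [hres k, List.getElem?_map, PySem.List.getElem?_enumerate]
    by_cases hk : k < l.length
    · rw [List.getElem?_eq_getElem hk]
      simp only [Option.map_some, zero_add]
      rw [blankChar _ _ l k hk, apply_ite some]
    · rw [List.getElem?_eq_none (by omega)]
      simp only [Option.map_none]
      rw [if_neg (by tauto)]
  have h1 := (foldA_getElem? (listBps s2.toList) (listBps s1.toList) s1.toList s2.toList)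
  refine Prod.ext ?_ ?_ <;> simp only
  · apply congrArg
    exact key s1.toList _ (fun k => (h1 k (listBps_nonneg s1.toList)).1)
  · apply congrArg
    exact key s2.toList _ (fun k => (h1 k (listBps_nonneg s1.toList)).2)

-- ===== VERDICT (by name: the statement is the Claim_ definition above) =====
theorem filter_common_bps_spec : Claim_equal_filter_common_bps := by
  intro s1 s2 _ _
  unfold Spec_filter_common_bps
  exact ports_agree s1 s2
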